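-- pv_equiv track=rewrite | github.com/krzysztof-turowski/programming-contests | facebook-hacker-cup/2023-round-1/back_in_black_chapter_2.py | solve
-- ===== SOURCE A (Python) =====
-- def apply(S, b):
--     for i in range(b - 1, len(S), b):
--         S[i] = '1' if S[i] == '0' else '0'
--
-- def solve(S, B):
--     S0, A = S, set()
--     for i, s in enumerate(S0, start = 1):
--         if s == '1':
--             apply(S0, i)
--             A.add(i)
--     out = 0
--     for b in B:
--         if b in A:
--             A.remove(b)
--         else:
--             A.add(b)
--         out += len(A)
--     return out
-- ===== SOURCE B (Python) =====
-- def solve(S, B):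
--     # Gather pass: no mutation of S; decide membership of i from the original
--     # character and the parity of earlier members of A dividing i.
--     A = set()
--     for i in range(1, len(S) + 1):
--         k = sum(1 for j in A if i % j == 0)
--         c = S[i - 1]
--         if k == 0:
--             in_a = (c == '1')
--         else:
--             in_a = (k % 2 == 1) != (c != '0')
--         if in_a:
--             A.add(i)
--     out = 0
--     cnt = len(A)
--     for b in B:
--         if b in A:
--             A.remove(b)
--             cnt -= 1
--         else:
--             A.add(b)
--             cnt += 1
--         out += cnt
--     return out
-- ===== Notes on version B (the rewrite author's own statement) =====
-- stated objective: alternative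
-- what changed: A decides membership of i by mutating S with a scatter flip-sieve (apply flips every b-th cell in place) and reading the mutated cell; B never mutates S: it gathers, for each i, the number k of earlier members of A dividing i and derives the membership test from the original character and k, then runs the toggle loop with a maintained counter instead of re-taking len(A); note A mutates its argument S in place while B leaves it untouched (return values agree).
import Mathlib
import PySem

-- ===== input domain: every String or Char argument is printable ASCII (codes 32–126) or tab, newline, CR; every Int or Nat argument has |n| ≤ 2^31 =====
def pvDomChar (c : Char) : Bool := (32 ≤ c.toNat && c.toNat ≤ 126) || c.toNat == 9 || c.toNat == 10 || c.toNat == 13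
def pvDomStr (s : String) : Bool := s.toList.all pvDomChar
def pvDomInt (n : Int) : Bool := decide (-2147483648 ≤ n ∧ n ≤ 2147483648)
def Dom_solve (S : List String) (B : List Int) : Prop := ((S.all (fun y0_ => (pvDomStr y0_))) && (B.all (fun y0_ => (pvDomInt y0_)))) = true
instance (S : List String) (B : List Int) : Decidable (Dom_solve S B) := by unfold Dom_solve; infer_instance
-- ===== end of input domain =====

-- B replaces A's scatter flip-sieve (which mutates S in place) by a gather pass reading the
-- original S and counting earlier divisors in A; equivalence is about the RETURN value only
-- (A mutates its argument S, B does not).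

-- ===== PORT A =====
def pyFlip (s : String) : String := if s == "0" then "1" else "0"

-- the loop `for i in range(b-1, len(S), b): S[i] = flip(S[i])` (range as a while with step b = bm1+1)
def applyLoop (bm1 : Nat) (i : Nat) (S : List String) : List String :=
  if h : i < S.length then applyLoop bm1 (i + (bm1 + 1)) (S.set i (pyFlip (S.getD i ""))) else S
termination_by S.length - i
decreasing_by simp only [List.length_set]; omega

def applyA (S : List String) (b : Nat) : List String := applyLoop (b - 1) (b - 1) S

-- `for i, s in enumerate(S0, start=1): …` — reads the CURRENT (mutated) list at each position
def loopA : Nat → Nat → List String → PySem.Set Int → List String × PySem.Set Int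
  | 0, _, S, A => (S, A)
  | k+1, i, S, A =>
    if S.getD i "" == "1" then
      loopA k (i+1) (applyA S (i+1)) (PySem.Set.add A ((i : Int) + 1))
    else loopA k (i+1) S A

def solve (S : List String) (B : List Int) : Int :=
  let A := (loopA S.length 0 S PySem.Set.empty).2
  (B.foldl (fun st b =>
      let A' := if PySem.Set.contains st.1 b then (PySem.Set.remove? st.1 b).getD [] else PySem.Set.add st.1 b
      (A', st.2 + (A'.length : Int))) (A, (0 : Int))).2

-- ===== PORT B =====
def loopB : Nat → Nat → List String → PySem.Set Int → PySem.Set Int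
  | 0, _, _, A => A
  | k+1, i, S0, A =>
    let kd := A.countP (fun j => PySem.Int.mod ((i : Int) + 1) j == 0)
    let c := S0.getD i ""
    let ina := if kd == 0 then c == "1" else ((kd % 2 == 1) != (c != "0"))
    loopB k (i+1) S0 (if ina then PySem.Set.add A ((i : Int) + 1) else A)

def solve_alt (S : List String) (B : List Int) : Int :=
  let A := loopB S.length 0 S PySem.Set.empty
  (B.foldl (fun st b =>
      if PySem.Set.contains st.1 b then
        ((PySem.Set.remove? st.1 b).getD [], st.2.1 - 1, st.2.2 + (st.2.1 - 1))
      else (PySem.Set.add st.1 b, st.2.1 + 1, st.2.2 + (st.2.1 + 1)))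
    (A, ((A.length : Int), (0 : Int)))).2.2

-- ===== PRECONDITION & SPEC =====
def Spec_solve (S : List String) (B : List Int) (out : Int) : Prop := out = solve_alt S B
instance (S : List String) (B : List Int) (out : Int) : Decidable (Spec_solve S B out) := by unfold Spec_solve; infer_instance

-- ===== CLAIM (what is proved, stated in full; the proofs are below) =====
def Claim_equal_solve : Prop := ∀ (S : List String) (B : List Int), Dom_solve S B → Spec_solve S B (solve S B)

-- ===== LEMMAS AND PROOFS =====

-- the flip function iterated (innermost first)
def flipIter : Nat → String → String
  | 0, c => c
  | k+1, c => flipIter k (pyFlip c)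

-- number of j ∈ A dividing m, as B counts it
def countA (A : List Int) (m : Nat) : Nat := A.countP (fun j => PySem.Int.mod (m : Int) j == 0)

lemma length_applyLoop (bm1 i : Nat) (S : List String) : (applyLoop bm1 i S).length = S.length := by
  fun_induction applyLoop with
  | case1 i S h ih => rw [ih]; simp
  | case2 => rfl

lemma applyLoop_getD (bm1 : Nat) (i : Nat) (S : List String) (p : Nat) :
    (applyLoop bm1 i S).getD p "" =
      if i ≤ p ∧ p < S.length ∧ (bm1+1) ∣ (p - i) then pyFlip (S.getD p "") else S.getD p "" := by
  fun_induction applyLoop with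
  | case1 i S h ih =>
    rw [ih]
    have hslen : (S.set i (pyFlip (S.getD i ""))).length = S.length := by simp
    by_cases hpi : p = i
    · subst hpi
      have hget : (S.set p (pyFlip (S.getD p ""))).getD p "" = pyFlip (S.getD p "") := by
        simp [List.getD, h]
      rw [if_neg (by rintro ⟨a, _, _⟩; omega), if_pos ⟨le_refl p, h, by simp⟩, hget]
    · have hget : (S.set i (pyFlip (S.getD i ""))).getD p "" = S.getD p "" := by
        simp [List.getD, Ne.symm hpi]
      rw [hget, hslen]
      by_cases hle : i + (bm1+1) ≤ p
      · have h1 : p - i = (p - (i+(bm1+1))) + (bm1+1) := by omega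
        have hd : (bm1+1) ∣ (p - i) ↔ (bm1+1) ∣ (p - (i+(bm1+1))) := by
          rw [h1, Nat.dvd_add_self_right]
        exact if_congr ⟨fun ⟨a, b, c⟩ => ⟨by omega, b, hd.mpr c⟩,
          fun ⟨a, b, c⟩ => ⟨hle, b, hd.mp c⟩⟩ rfl rfl
      · by_cases hip : i ≤ p
        · have hnd : ¬ (bm1+1) ∣ (p - i) := fun hd => by
            have := Nat.le_of_dvd (by omega) hd; omega
          rw [if_neg (by rintro ⟨a, _, _⟩; omega), if_neg (by rintro ⟨_, _, c⟩; exact hnd c)]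
        · rw [if_neg (by rintro ⟨a, _, _⟩; omega), if_neg (by rintro ⟨a, _, _⟩; omega)]
  | case2 i S h =>
    rw [if_neg (by rintro ⟨a, b, _⟩; omega)]

lemma flipIter_succ' (k : Nat) (c : String) : flipIter (k+1) c = pyFlip (flipIter k c) := by
  induction k generalizing c with
  | zero => rfl
  | succ k ih => show flipIter (k+1) (pyFlip c) = _ ; rw [ih (pyFlip c)]; rfl

lemma flip_bin (k : Nat) :
    (flipIter k "0" = if k % 2 = 0 then "0" else "1") ∧
    (flipIter k "1" = if k % 2 = 0 then "1" else "0") := by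
  induction k with
  | zero => simp [flipIter]
  | succ k ih =>
    constructor <;> rcases Nat.mod_two_eq_zero_or_one k with h | h <;>
      simp [flipIter, pyFlip, ih.1, ih.2, h, Nat.add_mod]

lemma flip_dec (k : Nat) (c : String) :
    (flipIter k c == "1") = (if k == 0 then c == "1" else ((k % 2 == 1) != (c != "0"))) := by
  cases k with
  | zero => simp [flipIter]
  | succ k =>
    by_cases hc : c = "0"
    · subst hc
      rcases Nat.mod_two_eq_zero_or_one k with h | h <;>
        simp [flipIter, pyFlip, (flip_bin k).2, h, Nat.add_mod]
    · have h0 : pyFlip c = "0" := by simp [pyFlip, hc]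
      rcases Nat.mod_two_eq_zero_or_one k with h | h <;>
        simp [flipIter, h0, (flip_bin k).1, h, Nat.add_mod, hc]

lemma countA_append (A : List Int) (x : Int) (m : Nat) :
    countA (A ++ [x]) m = countA A m + (if PySem.Int.mod (m : Int) x == 0 then 1 else 0) := by
  simp [countA, List.countP_append, List.countP_cons]

lemma loops_agree (S0 : List String) :
    ∀ (k i : Nat) (S : List String) (A : PySem.Set Int),
      S.length = S0.length → i + k = S0.length →
      (∀ j ∈ A, 1 ≤ j ∧ j ≤ (i : Int)) →
      (∀ p, p < S0.length → S.getD p "" = flipIter (countA A (p+1)) (S0.getD p "")) →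
      (loopA k i S A).2 = loopB k i S0 A := by
  intro k
  induction k with
  | zero => intro i S A _ _ _ _; rfl
  | succ k ih =>
    intro i S A hlen hik hb hS
    have hi : i < S0.length := by omega
    simp only [loopA, loopB]
    have hkd : A.countP (fun j => PySem.Int.mod ((i:Int)+1) j == 0) = countA A (i+1) := by
      simp [countA]
    have hdec : (S.getD i "" == "1")
        = (if (A.countP (fun j => PySem.Int.mod ((i:Int)+1) j == 0)) == 0
           then (S0.getD i "" == "1")
           else (((A.countP (fun j => PySem.Int.mod ((i:Int)+1) j == 0)) % 2 == 1)
                  != (S0.getD i "" != "0"))) := by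
      rw [hS i hi, flip_dec, ← hkd]
    rw [hdec]
    by_cases hco : (if (A.countP (fun j => PySem.Int.mod ((i:Int)+1) j == 0)) == 0
           then (S0.getD i "" == "1")
           else (((A.countP (fun j => PySem.Int.mod ((i:Int)+1) j == 0)) % 2 == 1)
                  != (S0.getD i "" != "0"))) = true
    · rw [if_pos hco, if_pos hco]
      have hnm : ((i:Int)+1) ∉ A := fun hmem => by have := (hb _ hmem).2; omega
      have hadd : PySem.Set.add A ((i:Int)+1) = A ++ [(i:Int)+1] := by
        simp [PySem.Set.add, pysem, hnm]
      apply ih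
      · show (applyA S (i+1)).length = S0.length
        simp only [applyA]
        rw [length_applyLoop]; exact hlen
      · omega
      · intro j hj
        rcases (PySem.Set.mem_add A _ j).mp hj with hj' | hj'
        · have := hb j hj'
          constructor
          · exact this.1
          · omega
        · subst hj'
          constructor
          · have : (0:Int) ≤ (i:Int) := Int.natCast_nonneg i
            omega
          · omega
      · intro p hp
        have hpS : p < S.length := by omega
        rw [hadd, countA_append]
        have happ : applyA S (i+1) = applyLoop i i S := rfl
        rw [happ, applyLoop_getD]
        by_cases hd : (i+1) ∣ (p+1)
        · have hmod : (PySem.Int.mod (((p:Nat)+1 : Nat) : Int) ((i:Int)+1) == 0) = true := by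
            have h4 : ((i:Int)+1) ∣ ((p:Int)+1) := by
              have h5 := Int.natCast_dvd_natCast.mpr hd
              push_cast at h5; exact h5
            simp [h4]
          have hip : i ≤ p := by
            have := Nat.le_of_dvd (by omega) hd; omega
          have hdi : (i+1) ∣ (p - i) := by
            have h2 : (i+1) ∣ (p+1) - (i+1) := Nat.dvd_sub hd dvd_rfl
            have h3 : p + 1 - (i+1) = p - i := by omega
            rwa [h3] at h2
          rw [if_pos ⟨hip, hpS, hdi⟩, hmod, if_pos rfl, hS p hp, ← flipIter_succ']
        · have hmod : (PySem.Int.mod (((p:Nat)+1 : Nat) : Int) ((i:Int)+1) == 0) = false := by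
            have h4 : ¬ ((i:Int)+1) ∣ ((p:Int)+1) := by
              intro hdd
              apply hd
              have h5 : ((i+1 : Nat) : Int) ∣ ((p+1 : Nat) : Int) := by push_cast; exact hdd
              exact_mod_cast h5
            simp [h4]
          have hnc : ¬ (i ≤ p ∧ p < S.length ∧ (i+1) ∣ (p - i)) := by
            rintro ⟨hip, -, hdi⟩
            apply hd
            have h2 : p + 1 = (p - i) + (i + 1) := by omega
            rw [h2]
            exact (Nat.dvd_add_self_right).mpr hdi
          rw [if_neg hnc, hmod, if_neg (by simp), Nat.add_zero, hS p hp]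
    · rw [if_neg hco, if_neg hco]
      apply ih _ _ _ hlen (by omega)
      · intro j hj
        have := hb j hj
        exact ⟨this.1, by omega⟩
      · exact hS

lemma loopB_nodup : ∀ (k i : Nat) (S0 : List String) (A : PySem.Set Int),
    A.Nodup → (loopB k i S0 A).Nodup := by
  intro k
  induction k with
  | zero => intro i S0 A h; exact h
  | succ k ih =>
    intro i S0 A h
    simp only [loopB]
    apply ih
    split <;> split <;> first | exact PySem.Set.nodup_add _ _ h | exact h

lemma length_discard (s : List Int) (x : Int) (h : x ∈ s) (hn : s.Nodup) :
    (PySem.Set.discard s x).length = s.length - 1 := by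
  simp only [PySem.Set.discard]
  rw [show (fun y => !y == x) = (fun y : Int => y != x) from rfl, ← List.Nodup.erase_eq_filter hn x,
      List.length_erase_of_mem h]

lemma fold2 : ∀ (Bs : List Int) (A : PySem.Set Int) (out : Int), A.Nodup →
    (Bs.foldl (fun st b =>
        if PySem.Set.contains st.1 b then
          ((PySem.Set.remove? st.1 b).getD [], st.2.1 - 1, st.2.2 + (st.2.1 - 1))
        else (PySem.Set.add st.1 b, st.2.1 + 1, st.2.2 + (st.2.1 + 1)))
      (A, ((A.length : Int), out))).2.2
    = (Bs.foldl (fun st b =>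
        let A' := if PySem.Set.contains st.1 b then (PySem.Set.remove? st.1 b).getD [] else PySem.Set.add st.1 b
        (A', st.2 + (A'.length : Int))) (A, out)).2 := by
  intro Bs
  induction Bs with
  | nil => intro A out _; rfl
  | cons b Bs ih =>
    intro A out hnd
    simp only [List.foldl_cons]
    by_cases hm : b ∈ A
    · have hc : PySem.Set.contains A b = true := by simp [pysem, hm]
      have h1 : 1 ≤ A.length := List.length_pos_of_mem hm
      have hlen : ((PySem.Set.discard A b).length : Int) = (A.length : Int) - 1 := by
        rw [length_discard A b hm hnd, Nat.cast_sub h1, Nat.cast_one]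
      simp only [hc, if_true, PySem.Set.remove?_of_mem hm, Option.getD_some]
      rw [show ((A.length : Int) - 1) = ((PySem.Set.discard A b).length : Int) from hlen.symm]
      exact ih _ _ (PySem.Set.nodup_discard _ _ hnd)
    · have hc : PySem.Set.contains A b = false := by simp [pysem, hm]
      have hlen : (((PySem.Set.add A b).length : Int)) = (A.length : Int) + 1 := by
        simp [PySem.Set.add, pysem, hm]
      simp only [hc, Bool.false_eq_true, if_false]
      rw [show ((A.length : Int) + 1) = ((PySem.Set.add A b).length : Int) from hlen.symm]
      exact ih _ _ (PySem.Set.nodup_add _ _ hnd)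

-- ===== VERDICT (by name: the statement is the Claim_ definition above) =====
theorem solve_spec : Claim_equal_solve := by
  intro S B _
  unfold Spec_solve solve solve_alt
  have hA : (loopA S.length 0 S PySem.Set.empty).2 = loopB S.length 0 S PySem.Set.empty := by
    apply loops_agree S S.length 0 S PySem.Set.empty rfl (by omega)
    · intro j hj; simp [PySem.Set.empty] at hj
    · intro p hp; simp [countA, flipIter, PySem.Set.empty]
  have hn : (loopB S.length 0 S PySem.Set.empty).Nodup := loopB_nodup _ _ _ _ (by simp [PySem.Set.empty])
  simp only [hA]
  rw [← fold2 B _ 0 hn]
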